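/-
  THE CONTRACTS OF libm (c/libm.c; design/CONTRACTS.md entries 93, 94, 96–100, 103–107): `Spec`s over the shadow layer only.
  Ghost parameters of every Spec: `others`, `frames` — the live objects of the shadow invariant.

  FLOATING-POINT VALUES ARE OPAQUE in this proof: no Spec of this file says anything about an xmm register, in the pre or in
  the post (FP1: what the SSE steps need — the six exception masks of MXCSR set — is the convention's `abiInv`, part of every
  `AtEntry` and `Returned`). The INTEGER arguments (`two_to(edi)`, `ldexp(xmm0, edi)`, `pow_int(xmm0, edi)`,
  `sincos_quadrant(xmm0, edi)`) may have ANY value: every one of these functions returns for every value (a caller passes the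
  result of a `cvttsd2si`, an arbitrary integer to the proof), and no caller needs to know anything about a result.

  So the twelve contracts differ in ONE number, the stack frame:

      function          own frame                       callees (largest frame)        frame
      two_to            —                               —                                 0
      pow_int           —   (the only loop: `edi` halves)   —                             0
      sin_poly          —                               —                                 0
      cos_poly          —                               —                                 0
      floor             —                               —                                 0
      ldexp             push rbx, sub rsp 8 = 16        two_to (0)              16 + 8 =  24
      sincos_quadrant   push rbp, push rbx = 16         floor, sin_poly, cos_poly (0)     24
      exp               sub rsp 8 = 8                   two_to, floor, ldexp (24)  8+8+24 = 40
      log               push rbx = 8                    two_to (0)               8 + 8 =  16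
      pow               sub rsp 8 = 8                   pow_int, log (16), exp (40)       56
      sin, cos          —                               sincos_quadrant (24)     8 + 24 = 32

  What they read besides their own stack: 8-byte constants of `.rodata` (`[120060H, 120208H)`) and the 16-byte sign mask at
  `120000H` (16-aligned: `xorpd`), by RIP-relative operands — inside the user region of the layout by arithmetic, no check call.
  They store to their own stack only (`writes _ := []`) and call no check routine: no `LiveIn` clause anywhere.

  The contracts are those of the shared package (ProgX/Spec/Libm.lean, stated for any program record `T : ProgX.Text`); the names of
  this file are their instances at `ProgX.Base.T` (abbreviations).
-/
import ProgX.Base.Spec.Basic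
import ProgX.Spec.Libm
namespace ProgX.Base.Spec
open X86 X86.User Asan

/-- **`two_to(edi = n)`** (CONTRACTS 93), on the base image: the generic contract
`ProgX.Spec.two_to.spec` (ProgX/Spec/Libm.lean, where it is described) at the text record `ProgX.Base.T`. -/
abbrev two_to.spec (others : List Obj) (frames : List (Nat × FrameLayout)) : Spec :=
  ProgX.Spec.two_to.spec T others frames

/-- **`pow_int(xmm0 = x, edi = n)`** (CONTRACTS 99), on the base image: the generic contract
`ProgX.Spec.pow_int.spec` (ProgX/Spec/Libm.lean, where it is described) at the text record `ProgX.Base.T`. -/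
abbrev pow_int.spec (others : List Obj) (frames : List (Nat × FrameLayout)) : Spec :=
  ProgX.Spec.pow_int.spec T others frames

/-- **`sin_poly(xmm0 = r)`** (CONTRACTS 103), on the base image: the generic contract
`ProgX.Spec.sin_poly.spec` (ProgX/Spec/Libm.lean, where it is described) at the text record `ProgX.Base.T`. -/
abbrev sin_poly.spec (others : List Obj) (frames : List (Nat × FrameLayout)) : Spec :=
  ProgX.Spec.sin_poly.spec T others frames

/-- **`cos_poly(xmm0 = r)`** (CONTRACTS 104), on the base image: the generic contract
`ProgX.Spec.cos_poly.spec` (ProgX/Spec/Libm.lean, where it is described) at the text record `ProgX.Base.T`. -/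
abbrev cos_poly.spec (others : List Obj) (frames : List (Nat × FrameLayout)) : Spec :=
  ProgX.Spec.cos_poly.spec T others frames

/-- **`floor(xmm0 = x)`** (CONTRACTS 96), on the base image: the generic contract
`ProgX.Spec.floor.spec` (ProgX/Spec/Libm.lean, where it is described) at the text record `ProgX.Base.T`. -/
abbrev floor.spec (others : List Obj) (frames : List (Nat × FrameLayout)) : Spec :=
  ProgX.Spec.floor.spec T others frames

/-- **`ldexp(xmm0 = x, edi = n)`** (CONTRACTS 94), on the base image: the generic contract
`ProgX.Spec.ldexp.spec` (ProgX/Spec/Libm.lean, where it is described) at the text record `ProgX.Base.T`. -/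
abbrev ldexp.spec (others : List Obj) (frames : List (Nat × FrameLayout)) : Spec :=
  ProgX.Spec.ldexp.spec T others frames

/-- **`sincos_quadrant(xmm0 = x, edi = shift)`** (CONTRACTS 105), on the base image: the generic contract
`ProgX.Spec.sincos_quadrant.spec` (ProgX/Spec/Libm.lean, where it is described) at the text record `ProgX.Base.T`. -/
abbrev sincos_quadrant.spec (others : List Obj) (frames : List (Nat × FrameLayout)) : Spec :=
  ProgX.Spec.sincos_quadrant.spec T others frames

/-- **`exp(xmm0 = x)`** (CONTRACTS 97), on the base image: the generic contract
`ProgX.Spec.exp.spec` (ProgX/Spec/Libm.lean, where it is described) at the text record `ProgX.Base.T`. -/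
abbrev exp.spec (others : List Obj) (frames : List (Nat × FrameLayout)) : Spec :=
  ProgX.Spec.exp.spec T others frames

/-- **`log(xmm0 = x)`** (CONTRACTS 98), on the base image: the generic contract
`ProgX.Spec.log.spec` (ProgX/Spec/Libm.lean, where it is described) at the text record `ProgX.Base.T`. -/
abbrev log.spec (others : List Obj) (frames : List (Nat × FrameLayout)) : Spec :=
  ProgX.Spec.log.spec T others frames

/-- **`pow(xmm0 = x, xmm1 = y)`** (CONTRACTS 100), on the base image: the generic contract
`ProgX.Spec.pow.spec` (ProgX/Spec/Libm.lean, where it is described) at the text record `ProgX.Base.T`. -/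
abbrev pow.spec (others : List Obj) (frames : List (Nat × FrameLayout)) : Spec :=
  ProgX.Spec.pow.spec T others frames

/-- **`sin(xmm0 = x)`** (CONTRACTS 106), on the base image: the generic contract
`ProgX.Spec.sin.spec` (ProgX/Spec/Libm.lean, where it is described) at the text record `ProgX.Base.T`. -/
abbrev sin.spec (others : List Obj) (frames : List (Nat × FrameLayout)) : Spec :=
  ProgX.Spec.sin.spec T others frames

/-- **`cos(xmm0 = x)`** (CONTRACTS 107), on the base image: the generic contract
`ProgX.Spec.cos.spec` (ProgX/Spec/Libm.lean, where it is described) at the text record `ProgX.Base.T`. -/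
abbrev cos.spec (others : List Obj) (frames : List (Nat × FrameLayout)) : Spec :=
  ProgX.Spec.cos.spec T others frames

/-! The `vspec` rewrite rules (frame sizes, footprints) are the generic ones. -/
export ProgX.Spec (
  two_to.spec_frame two_to.spec_writes pow_int.spec_frame pow_int.spec_writes sin_poly.spec_frame sin_poly.spec_writes
  cos_poly.spec_frame cos_poly.spec_writes floor.spec_frame floor.spec_writes ldexp.spec_frame ldexp.spec_writes
  sincos_quadrant.spec_frame sincos_quadrant.spec_writes exp.spec_frame exp.spec_writes log.spec_frame log.spec_writes
  pow.spec_frame pow.spec_writes sin.spec_frame sin.spec_writes cos.spec_frame cos.spec_writes)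

end ProgX.Base.Spec
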